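-- pv_equiv track=rewrite | github.com/dscfuta/upshot | CGPA.py | convert_scores
-- ===== SOURCE A (Python) =====
-- def convert_scores(scores):
--     result=[]
--     for score in scores:
--         if score>=70:
--             result.append(5)
--         elif 60<= score<70:
--             result.append(4)
--         elif 50<=score<60:
--             result.append(3)
--         elif 45<=score<50:
--             result.append(2)
--         else:
--             result.append(0)
--     return result
-- ===== SOURCE B (Python) =====
-- BOUNDARIES = [45, 50, 60, 70]
-- GRADES = [0, 2, 3, 4, 5]
--
-- def convert_scores(scores):
--     return [GRADES[sum(b <= s for b in BOUNDARIES)] for s in scores]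
-- ===== Notes on version B (the rewrite author's own statement) =====
-- stated objective: idiomatic
-- what changed: Replaces the if/elif cascade with a threshold-table lookup: for each score, count how many grade boundaries it has reached and index a parallel list of grade points.
import Mathlib
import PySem

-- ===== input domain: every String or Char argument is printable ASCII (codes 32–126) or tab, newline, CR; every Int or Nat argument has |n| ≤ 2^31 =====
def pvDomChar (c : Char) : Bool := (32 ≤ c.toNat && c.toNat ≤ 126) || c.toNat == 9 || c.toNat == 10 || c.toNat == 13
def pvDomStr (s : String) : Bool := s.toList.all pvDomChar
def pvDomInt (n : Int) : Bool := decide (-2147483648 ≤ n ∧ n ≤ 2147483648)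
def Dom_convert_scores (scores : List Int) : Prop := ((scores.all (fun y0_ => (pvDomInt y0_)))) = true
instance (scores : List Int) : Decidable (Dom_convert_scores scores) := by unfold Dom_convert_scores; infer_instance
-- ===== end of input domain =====

-- B replaces A's if/elif cascade by a threshold table (count boundaries reached, index a grades list); same O(n) cost, more idiomatic.

-- ===== PORT A =====
def convert_scores (scores : List Int) : List Int :=
  scores.foldl (fun result score =>
    if score ≥ 70 then result ++ [5]
    else if 60 ≤ score ∧ score < 70 then result ++ [4]
    else if 50 ≤ score ∧ score < 60 then result ++ [3]
    else if 45 ≤ score ∧ score < 50 then result ++ [2]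
    else result ++ [0]) []

-- ===== PORT B =====
def pvBoundaries : List Int := [45, 50, 60, 70]
def pvGrades : List Int := [0, 2, 3, 4, 5]

-- GRADES[idx]: idx = number of boundaries ≤ s is always 0..4, in range, so Python never raises;
-- ported with pyGet? (none = IndexError) defaulted to 0, unreachable.
def convert_scores_alt (scores : List Int) : List Int :=
  scores.map (fun s =>
    (PySem.List.pyGet? pvGrades
      (pvBoundaries.foldl (fun acc b => acc + (if b ≤ s then 1 else 0)) 0)).getD 0)

-- ===== PRECONDITION & SPEC =====
def Spec_convert_scores (scores : List Int) (out : List Int) : Prop := out = convert_scores_alt scores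
instance (scores : List Int) (out : List Int) : Decidable (Spec_convert_scores scores out) := by unfold Spec_convert_scores; infer_instance

-- ===== CLAIM (what is proved, stated in full; the proofs are below) =====
def Claim_equal_convert_scores : Prop := ∀ (scores : List Int), Dom_convert_scores scores → Spec_convert_scores scores (convert_scores scores)

-- ===== LEMMAS AND PROOFS =====

def pvGradeA (score : Int) : Int :=
  if score ≥ 70 then 5
  else if 60 ≤ score ∧ score < 70 then 4
  else if 50 ≤ score ∧ score < 60 then 3
  else if 45 ≤ score ∧ score < 50 then 2
  else 0

def pvGradeB (s : Int) : Int :=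
  (PySem.List.pyGet? pvGrades
    (pvBoundaries.foldl (fun acc b => acc + (if b ≤ s then 1 else 0)) 0)).getD 0

theorem pvGrade_eq (s : Int) : pvGradeA s = pvGradeB s := by
  unfold pvGradeA pvGradeB pvBoundaries pvGrades
  by_cases h70 : 70 ≤ s <;> by_cases h60 : 60 ≤ s <;> by_cases h50 : 50 ≤ s <;>
    by_cases h45 : 45 ≤ s <;>
    simp [List.foldl, h70, h60, h50, h45, PySem.List.pyGet?, PySem.List.pyIdx?] <;> omega

theorem convert_scores_foldl (scores : List Int) (acc : List Int) :
    scores.foldl (fun result score =>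
      if score ≥ 70 then result ++ [5]
      else if 60 ≤ score ∧ score < 70 then result ++ [4]
      else if 50 ≤ score ∧ score < 60 then result ++ [3]
      else if 45 ≤ score ∧ score < 50 then result ++ [2]
      else result ++ [0]) acc = acc ++ scores.map pvGradeA := by
  induction scores generalizing acc with
  | nil => simp
  | cons x xs ih =>
    simp only [List.foldl, List.map]
    rw [ih]
    unfold pvGradeA
    split_ifs <;> simp

-- ===== VERDICT (by name: the statement is the Claim_ definition above) =====
theorem convert_scores_spec : Claim_equal_convert_scores := by
  intro scores _
  unfold Spec_convert_scores convert_scores convert_scores_alt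
  rw [convert_scores_foldl]
  simp only [List.nil_append]
  exact List.map_congr_left (fun s _ => pvGrade_eq s)
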